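-- pv_equiv track=rewrite | github.com/KoreaMGLEE/erase | scripts/experiment_011_prepare_detB.py | assign_zones
-- ===== SOURCE A (Python) =====
-- def assign_zones(all_ids, small_easy_sets, large_easy_set):
--     zones = {}
--     zone_counts = {"S_all": 0, "S_partial": 0, "Shared": 0, "L_only": 0, "Neither": 0}
--     for idx in all_ids:
--         n_small = sum(1 for s in small_easy_sets if idx in s)
--         is_large = idx in large_easy_set
--         if n_small == 3 and not is_large:
--             zone = "S_all"
--         elif n_small >= 1 and not is_large:
--             zone = "S_partial"
--         elif n_small >= 1 and is_large:
--             zone = "Shared"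
--         elif n_small == 0 and is_large:
--             zone = "L_only"
--         else:
--             zone = "Neither"
--         zones[idx] = zone
--         zone_counts[zone] += 1
--     return zones, zone_counts
-- ===== SOURCE B (Python) =====
-- def assign_zones(all_ids, small_easy_sets, large_easy_set):
--     n_small_of = {}
--     for s in small_easy_sets:
--         for x in set(s):
--             n_small_of[x] = n_small_of.get(x, 0) + 1
--     large = set(large_easy_set)
--
--     def zone_of(idx):
--         n = n_small_of.get(idx, 0)
--         if idx in large:
--             return "Shared" if n >= 1 else "L_only"
--         if n == 3:
--             return "S_all"
--         if n >= 1: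
--             return "S_partial"
--         return "Neither"
--
--     zones = {idx: zone_of(idx) for idx in all_ids}
--     zone_counts = {"S_all": 0, "S_partial": 0, "Shared": 0, "L_only": 0, "Neither": 0}
--     for idx in all_ids:
--         zone_counts[zone_of(idx)] += 1
--     return zones, zone_counts
-- ===== Notes on version B (the rewrite author's own statement) =====
-- stated objective: faster
-- what changed: B inverts the loops: one preprocessing pass builds a dict counting in how many small sets each element occurs and a hash set of large_easy_set, so each id is classified by O(1) lookups in a pure zone_of function (branching on is_large first) instead of rescanning every list per id; the zones dict and the fixed five-key counts dict are then filled in two separate passes.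
import Mathlib
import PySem

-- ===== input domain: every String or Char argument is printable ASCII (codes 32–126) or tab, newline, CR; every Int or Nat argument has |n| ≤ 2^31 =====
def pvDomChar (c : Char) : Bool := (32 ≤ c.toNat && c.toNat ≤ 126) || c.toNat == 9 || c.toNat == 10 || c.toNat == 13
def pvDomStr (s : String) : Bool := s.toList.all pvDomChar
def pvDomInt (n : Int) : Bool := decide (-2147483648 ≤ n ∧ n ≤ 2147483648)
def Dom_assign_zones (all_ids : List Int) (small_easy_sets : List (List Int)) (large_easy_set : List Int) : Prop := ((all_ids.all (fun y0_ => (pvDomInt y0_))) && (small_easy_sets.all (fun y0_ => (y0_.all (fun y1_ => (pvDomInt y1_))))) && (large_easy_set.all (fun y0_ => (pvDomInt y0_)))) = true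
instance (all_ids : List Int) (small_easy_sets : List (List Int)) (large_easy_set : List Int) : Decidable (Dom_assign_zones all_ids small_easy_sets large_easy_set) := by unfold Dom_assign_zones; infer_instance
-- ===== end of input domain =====

-- B inverts the loops: it counts, once, in how many small sets each element occurs (a dict)
-- and turns large_easy_set into a hash set, so each id is classified by O(1) lookups instead of
-- rescanning every list; zones and counts are then filled in two separate passes (objective: faster).

-- ===== PORT A =====
def assign_zones (all_ids : List Int) (small_easy_sets : List (List Int)) (large_easy_set : List Int) : (List (Int × String)) × (List (String × Int)) :=
  let init : PySem.Dict Int String × PySem.Dict String Int :=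
    (PySem.Dict.empty,
     PySem.Dict.ofList [("S_all", 0), ("S_partial", 0), ("Shared", 0), ("L_only", 0), ("Neither", 0)])
  let res := all_ids.foldl (fun st idx =>
    let n_small : Int := (small_easy_sets.map (fun s => if s.contains idx then (1 : Int) else 0)).sum
    let is_large := large_easy_set.contains idx
    let zone :=
      if n_small = 3 ∧ is_large = false then "S_all"
      else if 1 ≤ n_small ∧ is_large = false then "S_partial"
      else if 1 ≤ n_small ∧ is_large = true then "Shared"
      else if n_small = 0 ∧ is_large = true then "L_only"
      else "Neither"
    (st.1.insert idx zone, st.2.modify zone 0 (· + 1))) init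
  (res.1.items, res.2.items)

-- ===== PORT B =====
-- B's zone_of helper: O(1) lookups in the occurrence-count dict and the large set, is_large branch first
def pvZoneOf (cnt : PySem.Dict Int Int) (large : PySem.Set Int) (idx : Int) : String :=
  let n : Int := cnt.getD idx 0
  if PySem.Set.contains large idx then
    if 1 ≤ n then "Shared" else "L_only"
  else if n = 3 then "S_all"
  else if 1 ≤ n then "S_partial"
  else "Neither"

def assign_zones_alt (all_ids : List Int) (small_easy_sets : List (List Int)) (large_easy_set : List Int) : (List (Int × String)) × (List (String × Int)) :=
  let n_small_of := small_easy_sets.foldl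
    (fun (d : PySem.Dict Int Int) s => (PySem.Set.ofList s).foldl (fun d x => d.modify x 0 (· + 1)) d)
    PySem.Dict.empty
  let large := PySem.Set.ofList large_easy_set
  let zones := all_ids.foldl
    (fun (d : PySem.Dict Int String) idx => d.insert idx (pvZoneOf n_small_of large idx)) PySem.Dict.empty
  let counts := all_ids.foldl
    (fun (d : PySem.Dict String Int) idx => d.modify (pvZoneOf n_small_of large idx) 0 (· + 1))
    (PySem.Dict.ofList [("S_all", 0), ("S_partial", 0), ("Shared", 0), ("L_only", 0), ("Neither", 0)])
  (zones.items, counts.items)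

-- ===== PRECONDITION & SPEC =====
def Spec_assign_zones (all_ids : List Int) (small_easy_sets : List (List Int)) (large_easy_set : List Int) (out : (List (Int × String)) × (List (String × Int))) : Prop := out = assign_zones_alt all_ids small_easy_sets large_easy_set
instance (all_ids : List Int) (small_easy_sets : List (List Int)) (large_easy_set : List Int) (out : (List (Int × String)) × (List (String × Int))) : Decidable (Spec_assign_zones all_ids small_easy_sets large_easy_set out) := by unfold Spec_assign_zones; infer_instance

-- ===== CLAIM (what is proved, stated in full; the proofs are below) =====
def Claim_equal_assign_zones : Prop := ∀ (all_ids : List Int) (small_easy_sets : List (List Int)) (large_easy_set : List Int), Dom_assign_zones all_ids small_easy_sets large_easy_set → Spec_assign_zones all_ids small_easy_sets large_easy_set (assign_zones all_ids small_easy_sets large_easy_set)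

-- ===== LEMMAS AND PROOFS =====

-- Set membership built by B agrees with A's list membership
theorem pvContains_ofList (s : List Int) (idx : Int) :
    PySem.Set.contains (PySem.Set.ofList s) idx = s.contains idx := by
  rcases h : s.contains idx with _ | _ <;>
    simp_all [PySem.Set.contains_iff, PySem.Set.mem_ofList, List.contains_iff_mem]

-- deduplication makes each small set contribute its 0/1 indicator to the counter
theorem pvCount_ofList (s : List Int) (idx : Int) :
    ((PySem.Set.ofList s).count idx : Int) = if s.contains idx then (1 : Int) else 0 := by
  by_cases h : idx ∈ s
  · rw [if_pos (List.contains_iff_mem.mpr h)]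
    norm_cast
    exact List.count_eq_one_of_mem (PySem.Set.nodup_ofList s) ((PySem.Set.mem_ofList s idx).mpr h)
  · rw [if_neg (by simpa using (fun hc => h (List.contains_iff_mem.mp hc)))]
    norm_cast
    exact List.count_eq_zero.mpr (fun hc => h ((PySem.Set.mem_ofList s idx).mp hc))

-- B's counter dict holds exactly A's per-id indicator sum
theorem pvCnt_getD (small_easy_sets : List (List Int)) (d : PySem.Dict Int Int) (idx : Int) :
    (small_easy_sets.foldl
        (fun (d : PySem.Dict Int Int) s => (PySem.Set.ofList s).foldl (fun d x => d.modify x 0 (· + 1)) d)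
        d).getD idx 0
      = d.getD idx 0 + (small_easy_sets.map (fun s => if s.contains idx then (1 : Int) else 0)).sum := by
  induction small_easy_sets generalizing d with
  | nil => simp
  | cons s rest ih =>
      simp only [List.foldl_cons, List.map_cons, List.sum_cons, ih,
        PySem.Dict.getD_foldl_modify_add_one, pvCount_ofList]
      ring

theorem pvNSmall_nonneg (small_easy_sets : List (List Int)) (idx : Int) :
    0 ≤ (small_easy_sets.map (fun s => if s.contains idx then (1 : Int) else 0)).sum := by
  induction small_easy_sets with
  | nil => simp
  | cons s rest ih =>
      simp only [List.map_cons, List.sum_cons]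
      split <;> omega

-- A's branch chain equals B's is_large-first branch chain for any nonnegative count
theorem pvBranch_eq (n : Int) (l : Bool) (hn : 0 ≤ n) :
    (if n = 3 ∧ l = false then "S_all"
     else if 1 ≤ n ∧ l = false then "S_partial"
     else if 1 ≤ n ∧ l = true then "Shared"
     else if n = 0 ∧ l = true then "L_only"
     else "Neither")
      = (if l then (if 1 ≤ n then "Shared" else "L_only")
         else if n = 3 then "S_all" else if 1 ≤ n then "S_partial" else "Neither") := by
  cases l <;> simp only [Bool.false_eq_true, Bool.true_eq_false, and_true, and_false,
    if_false, if_true] <;> split_ifs <;> first | rfl | omega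

-- the per-id zone A computes is B's zone_of on the precomputed structures
theorem pvZone_eq (small_easy_sets : List (List Int)) (large_easy_set : List Int) (idx : Int) :
    (let n_small : Int := (small_easy_sets.map (fun s => if s.contains idx then (1 : Int) else 0)).sum
     let is_large := large_easy_set.contains idx
     if n_small = 3 ∧ is_large = false then "S_all"
     else if 1 ≤ n_small ∧ is_large = false then "S_partial"
     else if 1 ≤ n_small ∧ is_large = true then "Shared"
     else if n_small = 0 ∧ is_large = true then "L_only"
     else "Neither")
      = pvZoneOf
          (small_easy_sets.foldl
            (fun (d : PySem.Dict Int Int) s => (PySem.Set.ofList s).foldl (fun d x => d.modify x 0 (· + 1)) d)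
            PySem.Dict.empty)
          (PySem.Set.ofList large_easy_set) idx := by
  have hcnt := pvCnt_getD small_easy_sets PySem.Dict.empty idx
  simp only [PySem.Dict.getD_empty, zero_add] at hcnt
  simp only [pvZoneOf, pvContains_ofList, hcnt]
  exact pvBranch_eq _ _ (pvNSmall_nonneg small_easy_sets idx)

-- A's one fold with a pair state is B's two independent folds
theorem pvFold_split (small_easy_sets : List (List Int)) (large_easy_set : List Int)
    (ids : List Int) (z : PySem.Dict Int String) (c : PySem.Dict String Int) :
    ids.foldl (fun st idx =>
        let n_small : Int := (small_easy_sets.map (fun s => if s.contains idx then (1 : Int) else 0)).sum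
        let is_large := large_easy_set.contains idx
        let zone :=
          if n_small = 3 ∧ is_large = false then "S_all"
          else if 1 ≤ n_small ∧ is_large = false then "S_partial"
          else if 1 ≤ n_small ∧ is_large = true then "Shared"
          else if n_small = 0 ∧ is_large = true then "L_only"
          else "Neither"
        (st.1.insert idx zone, st.2.modify zone 0 (· + 1))) (z, c)
      = (ids.foldl
            (fun (d : PySem.Dict Int String) idx => d.insert idx
              (pvZoneOf (small_easy_sets.foldl
                  (fun (d : PySem.Dict Int Int) s => (PySem.Set.ofList s).foldl (fun d x => d.modify x 0 (· + 1)) d)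
                  PySem.Dict.empty) (PySem.Set.ofList large_easy_set) idx)) z,
         ids.foldl
            (fun (d : PySem.Dict String Int) idx => d.modify
              (pvZoneOf (small_easy_sets.foldl
                  (fun (d : PySem.Dict Int Int) s => (PySem.Set.ofList s).foldl (fun d x => d.modify x 0 (· + 1)) d)
                  PySem.Dict.empty) (PySem.Set.ofList large_easy_set) idx) 0 (· + 1)) c) := by
  induction ids generalizing z c with
  | nil => rfl
  | cons idx rest ih =>
      simp only [List.foldl_cons]
      rw [← pvZone_eq small_easy_sets large_easy_set idx]
      exact ih _ _

-- ===== VERDICT (by name: the statement is the Claim_ definition above) =====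
theorem assign_zones_spec : Claim_equal_assign_zones := by
  intro all_ids small_easy_sets large_easy_set _
  show _ = _
  simp only [assign_zones, assign_zones_alt]
  rw [pvFold_split]
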